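-- pv_equiv track=rewrite | github.com/shangshang0/phishtrace | scripts/generate_latex_data.py | safe_cmd
-- ===== SOURCE A (Python) =====
-- def safe_cmd(name: str) -> str:
--     """Sanitize a name for use as a LaTeX command.
--
--     TeX control sequences may only contain ASCII letters (a-z, A-Z).
--     Digits are spelled out so they don't break the command name.
--     """
--     _digit_words = {
--         "0": "Zero", "1": "One", "2": "Two", "3": "Three", "4": "Four",
--         "5": "Five", "6": "Six", "7": "Seven", "8": "Eight", "9": "Nine",
--     }
--     s = (name.replace("-", "").replace("_", "").replace(" ", "")
--          .replace("+", "Plus").replace("(", "").replace(")", "")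
--          .replace(".", "pt").replace(";", "").replace(",", "")
--          .replace("/", ""))
--     # Replace digits with word equivalents (TeX commands must be all-alpha)
--     for digit, word in _digit_words.items():
--         s = s.replace(digit, word)
--     return s
-- ===== SOURCE B (Python) =====
-- def safe_cmd(name: str) -> str:
--     """Sanitize a name for use as a LaTeX command (single pass over a lookup table)."""
--     table = {
--         "-": "", "_": "", " ": "", "+": "Plus", "(": "", ")": "",
--         ".": "pt", ";": "", ",": "", "/": "",
--         "0": "Zero", "1": "One", "2": "Two", "3": "Three", "4": "Four",
--         "5": "Five", "6": "Six", "7": "Seven", "8": "Eight", "9": "Nine",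
--     }
--     return "".join(table.get(ch, ch) for ch in name)
-- ===== Notes on version B (the rewrite author's own statement) =====
-- stated objective: alternative
-- what changed: Replaces the twenty sequential full-string .replace() passes with one per-character lookup table and a single join over one traversal of the input (valid because no replacement string contains any rule character); asymptotics are the same and CPython's C-level replace makes A faster in practice.
import Mathlib
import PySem

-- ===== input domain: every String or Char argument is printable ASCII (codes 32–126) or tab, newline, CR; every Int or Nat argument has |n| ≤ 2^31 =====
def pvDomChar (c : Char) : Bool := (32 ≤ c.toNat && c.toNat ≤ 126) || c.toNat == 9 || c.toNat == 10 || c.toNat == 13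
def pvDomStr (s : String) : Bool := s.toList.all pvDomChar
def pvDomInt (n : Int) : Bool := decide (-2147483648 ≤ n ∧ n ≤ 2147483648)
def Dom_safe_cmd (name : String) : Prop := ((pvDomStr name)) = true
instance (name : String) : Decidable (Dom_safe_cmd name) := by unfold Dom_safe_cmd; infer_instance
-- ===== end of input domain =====

-- B replaces A's twenty sequential full-string .replace() passes by one lookup table and a
-- single pass over the input; proved equal on all strings.

-- ===== PORT A =====
-- the dict literal `_digit_words` (distinct keys) as an association list in insertion order
def pvDigitWords : List (String × String) :=
  [("0", "Zero"), ("1", "One"), ("2", "Two"), ("3", "Three"), ("4", "Four"),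
   ("5", "Five"), ("6", "Six"), ("7", "Seven"), ("8", "Eight"), ("9", "Nine")]

def safe_cmd (name : String) : String :=
  let s :=
    PySem.Str.replace (PySem.Str.replace (PySem.Str.replace (PySem.Str.replace
      (PySem.Str.replace (PySem.Str.replace (PySem.Str.replace (PySem.Str.replace
        (PySem.Str.replace (PySem.Str.replace name "-" "") "_" "") " " "")
          "+" "Plus") "(" "") ")" "") "." "pt") ";" "") "," "") "/" ""
  pvDigitWords.foldl (fun s dw => PySem.Str.replace s dw.1 dw.2) s

-- ===== PORT B =====
-- the combined `table` dict literal from Source B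
def pvTable : PySem.Dict Char String :=
  ⟨[('-', ""), ('_', ""), (' ', ""), ('+', "Plus"), ('(', ""), (')', ""),
    ('.', "pt"), (';', ""), (',', ""), ('/', ""),
    ('0', "Zero"), ('1', "One"), ('2', "Two"), ('3', "Three"), ('4', "Four"),
    ('5', "Five"), ('6', "Six"), ('7', "Seven"), ('8', "Eight"), ('9', "Nine")]⟩

def safe_cmd_alt (name : String) : String :=
  PySem.Str.join "" (name.toList.map (fun ch => PySem.Dict.getD pvTable ch (String.ofList [ch])))

-- ===== PRECONDITION & SPEC =====
def Spec_safe_cmd (name : String) (out : String) : Prop := out = safe_cmd_alt name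
instance (name : String) (out : String) : Decidable (Spec_safe_cmd name out) := by unfold Spec_safe_cmd; infer_instance

-- ===== CLAIM (what is proved, stated in full; the proofs are below) =====
def Claim_equal_safe_cmd : Prop := ∀ (name : String), Dom_safe_cmd name → Spec_safe_cmd name (safe_cmd name)

-- ===== LEMMAS AND PROOFS =====

-- A's twenty single-character replace rules, in the order A applies them
def pvRules : List (Char × List Char) :=
  [('-', []), ('_', []), (' ', []), ('+', "Plus".toList), ('(', []), (')', []),
   ('.', "pt".toList), (';', []), (',', []), ('/', []),
   ('0', "Zero".toList), ('1', "One".toList), ('2', "Two".toList), ('3', "Three".toList),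
   ('4', "Four".toList), ('5', "Five".toList), ('6', "Six".toList), ('7', "Seven".toList),
   ('8', "Eight".toList), ('9', "Nine".toList)]

def pvApplyRule (l : List Char) (r : Char × List Char) : List Char :=
  l.flatMap (fun x => if x = r.1 then r.2 else [x])

-- a single-character replace is a flatMap
lemma pv_go_single (c : Char) (new : List Char) :
    ∀ (fuel : Nat) (l acc : List Char), l.length ≤ fuel →
      PySem.Chars.replace.go [c] new fuel l acc =
        acc.reverse ++ l.flatMap (fun x => if x = c then new else [x]) := by
  intro fuel
  induction fuel with
  | zero =>
    intro l acc h
    have : l = [] := List.eq_nil_of_length_eq_zero (Nat.le_zero.mp h)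
    subst this
    simp [PySem.Chars.replace.go]
  | succ n ih =>
    intro l acc h
    cases l with
    | nil => simp [PySem.Chars.replace.go]
    | cons x t =>
      by_cases hx : x = c
      · subst hx
        have hpre : List.isPrefixOf [x] (x :: t) = true := by
          simp [List.isPrefixOf]
        rw [PySem.Chars.replace.go]
        simp only [hpre, if_pos, List.length_cons, List.length_nil, List.drop_succ_cons,
          List.drop_zero]
        rw [ih t (new.reverse ++ acc) (by simpa using Nat.lt_succ_iff.mp (by simpa using h))]
        simp
      · have hpre : List.isPrefixOf [c] (x :: t) = false := by
          simp [List.isPrefixOf]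
          intro hc; exact hx hc.symm
        rw [PySem.Chars.replace.go]
        simp only [hpre]
        rw [ih t (x :: acc) (by simpa using Nat.lt_succ_iff.mp (by simpa using h))]
        simp [hx]

lemma pv_replace_single (l : List Char) (c : Char) (new : List Char) :
    PySem.Chars.replace l [c] new = l.flatMap (fun x => if x = c then new else [x]) := by
  rw [PySem.Chars.replace, if_neg (by simp)]
  exact (pv_go_single c new l.length l [] le_rfl).trans (by simp)

-- applying one rule, and hence the whole rule pipeline, distributes over ++
lemma pv_applyRule_append (a b : List Char) (r : Char × List Char) :
    pvApplyRule (a ++ b) r = pvApplyRule a r ++ pvApplyRule b r := by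
  simp [pvApplyRule]

lemma pv_foldl_append (rs : List (Char × List Char)) :
    ∀ (a b : List Char), rs.foldl pvApplyRule (a ++ b) =
      rs.foldl pvApplyRule a ++ rs.foldl pvApplyRule b := by
  induction rs with
  | nil => intro a b; simp
  | cons r rs ih => intro a b; simp only [List.foldl_cons, pv_applyRule_append, ih]

lemma pv_foldl_nil (rs : List (Char × List Char)) :
    rs.foldl pvApplyRule [] = [] := by
  induction rs with
  | nil => rfl
  | cons r rs ih => simpa [pvApplyRule] using ih

-- the pipeline acts character by character
lemma pv_pipeline_flatMap (l : List Char) :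
    pvRules.foldl pvApplyRule l = l.flatMap (fun c => pvRules.foldl pvApplyRule [c]) := by
  induction l with
  | nil => simp [pv_foldl_nil]
  | cons x t ih =>
    have : (x :: t) = [x] ++ t := rfl
    rw [this, pv_foldl_append, ih]
    simp

-- per character, A's pipeline produces exactly B's table entry
lemma pv_pointwise (c : Char) :
    pvRules.foldl pvApplyRule [c] = (PySem.Dict.getD pvTable c (String.ofList [c])).toList := by
  by_cases h1 : c = '-';  · subst h1; decide
  by_cases h2 : c = '_';  · subst h2; decide
  by_cases h3 : c = ' ';  · subst h3; decide
  by_cases h4 : c = '+';  · subst h4; decide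
  by_cases h5 : c = '(';  · subst h5; decide
  by_cases h6 : c = ')';  · subst h6; decide
  by_cases h7 : c = '.';  · subst h7; decide
  by_cases h8 : c = ';';  · subst h8; decide
  by_cases h9 : c = ',';  · subst h9; decide
  by_cases h10 : c = '/'; · subst h10; decide
  by_cases h11 : c = '0'; · subst h11; decide
  by_cases h12 : c = '1'; · subst h12; decide
  by_cases h13 : c = '2'; · subst h13; decide
  by_cases h14 : c = '3'; · subst h14; decide
  by_cases h15 : c = '4'; · subst h15; decide
  by_cases h16 : c = '5'; · subst h16; decide
  by_cases h17 : c = '6'; · subst h17; decide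
  by_cases h18 : c = '7'; · subst h18; decide
  by_cases h19 : c = '8'; · subst h19; decide
  by_cases h20 : c = '9'; · subst h20; decide
  have hf : List.find? (fun p : Char × String => p.1 == c) pvTable.items = none := by
    rw [List.find?_eq_none]
    intro p hp
    simp only [pvTable, List.mem_cons, List.not_mem_nil, or_false] at hp
    rcases hp with rfl|rfl|rfl|rfl|rfl|rfl|rfl|rfl|rfl|rfl|rfl|rfl|rfl|rfl|rfl|rfl|rfl|rfl|rfl|rfl <;>
      (simp only [beq_iff_eq]
       first | exact fun h => h1 h.symm | exact fun h => h2 h.symm | exact fun h => h3 h.symm | exact fun h => h4 h.symm | exact fun h => h5 h.symm | exact fun h => h6 h.symm | exact fun h => h7 h.symm | exact fun h => h8 h.symm | exact fun h => h9 h.symm | exact fun h => h10 h.symm | exact fun h => h11 h.symm | exact fun h => h12 h.symm | exact fun h => h13 h.symm | exact fun h => h14 h.symm | exact fun h => h15 h.symm | exact fun h => h16 h.symm | exact fun h => h17 h.symm | exact fun h => h18 h.symm | exact fun h => h19 h.symm | exact fun h => h20 h.symm)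
  rw [PySem.Dict.getD, PySem.Dict.get?, hf]
  simp [pvRules, pvApplyRule, h1, h2, h3, h4, h5, h6, h7, h8, h9, h10,
        h11, h12, h13, h14, h15, h16, h17, h18, h19, h20]

-- A's result, moved to the char-list level, is the rule pipeline
lemma pv_A_toList (name : String) :
    (safe_cmd name).toList = pvRules.foldl pvApplyRule name.toList := by
  simp only [safe_cmd, pvDigitWords, List.foldl_cons, List.foldl_nil]
  simp only [PySem.Str.toList_replace]
  simp only [show "-".toList = ['-'] by decide, show "_".toList = ['_'] by decide, show " ".toList = [' '] by decide, show "+".toList = ['+'] by decide, show "(".toList = ['('] by decide, show ")".toList = [')'] by decide, show ".".toList = ['.'] by decide, show ";".toList = [';'] by decide, show ",".toList = [','] by decide, show "/".toList = ['/'] by decide, show "0".toList = ['0'] by decide, show "1".toList = ['1'] by decide, show "2".toList = ['2'] by decide, show "3".toList = ['3'] by decide, show "4".toList = ['4'] by decide, show "5".toList = ['5'] by decide, show "6".toList = ['6'] by decide, show "7".toList = ['7'] by decide, show "8".toList = ['8'] by decide, show "9".toList = ['9'] by decide,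
    show "".toList = [] by decide]
  simp only [pv_replace_single]
  simp [pvRules, pvApplyRule, List.foldl_cons, List.foldl_nil]

-- B's result, moved to the char-list level
lemma pv_flatten_intersperse (l : List (List Char)) :
    (List.intersperse ([] : List Char) l).flatten = l.flatten := by
  induction l with
  | nil => rfl
  | cons a t ih =>
    cases t with
    | nil => rfl
    | cons b u =>
      rw [show List.intersperse ([] : List Char) (a :: b :: u) =
            a :: [] :: List.intersperse [] (b :: u) from rfl]
      simp only [List.flatten_cons] at ih ⊢
      simp [ih]

lemma pv_B_toList (name : String) :
    (safe_cmd_alt name).toList =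
      name.toList.flatMap (fun c => (PySem.Dict.getD pvTable c (String.ofList [c])).toList) := by
  simp [safe_cmd_alt, PySem.Str.toList_join, PySem.Chars.join, List.intercalate,
        pv_flatten_intersperse, List.flatMap, Function.comp_def]

-- ===== VERDICT (by name: the statement is the Claim_ definition above) =====
theorem safe_cmd_spec : Claim_equal_safe_cmd := by
  intro name _
  unfold Spec_safe_cmd
  apply String.toList_inj.mp
  rw [pv_A_toList, pv_B_toList, pv_pipeline_flatMap]
  exact List.flatMap_congr (fun c _ => pv_pointwise c)
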